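-- pv_equiv track=rewrite | github.com/Philippe-Cholet/checkio-mission-univocalic-davasaan | verification/inspector.py | inspector
-- ===== SOURCE A (Python) =====
-- MAX_CODE_LENGTH = 300
--
-- FORBIDDEN_CHARS = 'eiou*/.'
--
-- COMMENT_MARK = {
--     'python-3': '#',
--     'js-node': '//',
-- }
--
-- def sanitize_code(code: str, runner: str) -> str:
--     comment_mark = COMMENT_MARK.get(runner)
--
--     def empty(line):
--         return not line.strip()
--
--     def start_with_comment(line):
--         return comment_mark and line.lstrip().startswith(comment_mark)
--
--     lines = code.splitlines()
--
--     # Delete empty lines and commented lines from the start/end.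
--     # Not in the "middle" because it could be in a multiline string.
--     for i in (0, -1):
--         while lines and (empty(lines[i]) or start_with_comment(lines[i])):
--             lines.pop(i)
--
--     return '\n'.join(lines)
--
-- def inspector(code: str, runner: str = None):
--     # Clear the code of empty lines and commented lines.
--     code = sanitize_code(code, runner)
--
--     code_length = len(code)
--     if code_length > MAX_CODE_LENGTH:
--         return False, (f'The code is too long ({code_length}). '
--                        f'It must be shorter than {MAX_CODE_LENGTH} symbols.')
--
--     forbidden_chars = ''.join(c for c in FORBIDDEN_CHARS if c in code)
--     if forbidden_chars:
--         return False, ('Your code maybe returns correct answers, but it '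
--                        f'contains forbidden characters: "{forbidden_chars}".')
--
--     return True, f'Code length: {code_length}'
-- ===== SOURCE B (Python) =====
-- MAX_CODE_LENGTH = 300
--
-- FORBIDDEN_CHARS = 'eiou*/.'
--
-- COMMENT_MARK = {
--     'python-3': '#',
--     'js-node': '//',
-- }
--
-- def inspector(code, runner=None):
--     comment_mark = COMMENT_MARK.get(runner)
--
--     def trivial(line):
--         return not line.strip() or (
--             comment_mark is not None
--             and line.lstrip().startswith(comment_mark))
--
--     # Trim boundaries instead of mutating the list with pop(0)/pop(-1).
--     lines = code.splitlines()
--     start, end = 0, len(lines)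
--     while start < end and trivial(lines[start]):
--         start += 1
--     while end > start and trivial(lines[end - 1]):
--         end -= 1
--     code = '\n'.join(lines[start:end])
--
--     code_length = len(code)
--     if code_length > MAX_CODE_LENGTH:
--         return False, (f'The code is too long ({code_length}). '
--                        f'It must be shorter than {MAX_CODE_LENGTH} symbols.')
--
--     forbidden_chars = ''.join(c for c in FORBIDDEN_CHARS if c in code)
--     if forbidden_chars:
--         return False, ('Your code maybe returns correct answers, but it '
--                        f'contains forbidden characters: "{forbidden_chars}".')
--
--     return True, f'Code length: {code_length}'
-- ===== Notes on version B (the rewrite author's own statement) =====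
-- stated objective: alternative
-- what changed: sanitization no longer mutates the line list with repeated pop(0)/pop(-1): B scans a forward and a backward index over the immutable list to find the trim boundaries and joins one slice; the length and forbidden-character checks are unchanged.
import Mathlib
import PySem

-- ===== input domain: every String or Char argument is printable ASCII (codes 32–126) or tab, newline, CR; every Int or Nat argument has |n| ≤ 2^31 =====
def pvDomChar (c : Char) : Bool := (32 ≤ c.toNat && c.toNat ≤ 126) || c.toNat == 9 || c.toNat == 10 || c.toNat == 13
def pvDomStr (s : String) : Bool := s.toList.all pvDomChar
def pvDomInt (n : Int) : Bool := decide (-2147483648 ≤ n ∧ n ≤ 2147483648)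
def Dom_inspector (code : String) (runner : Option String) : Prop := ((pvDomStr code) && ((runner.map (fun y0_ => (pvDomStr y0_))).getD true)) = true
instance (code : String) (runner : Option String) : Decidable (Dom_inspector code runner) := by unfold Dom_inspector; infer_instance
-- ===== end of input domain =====

-- B computes the trim boundaries with two index scans and one slice instead of A's repeated pop(0)/pop(-1) list mutation (objective: alternative decomposition; return value identical).

-- ===== PORT A =====
-- shared module constants / helpers (same Python text in both programs)
def pvCommentMark : PySem.Dict String String :=
  PySem.Dict.ofList [("python-3", "#"), ("js-node", "//")]

-- COMMENT_MARK.get(runner) (runner=None is not a key)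
def pvGetMark (runner : Option String) : Option String :=
  match runner with
  | none => none
  | some r => pvCommentMark.get? r

-- empty(line) = not line.strip()
def pvEmpty (l : List Char) : Bool := (PySem.Chars.strip l).isEmpty

-- start_with_comment(line) = comment_mark and line.lstrip().startswith(comment_mark)
def pvStartsComment (mark : Option String) (l : List Char) : Bool :=
  match mark with
  | none => false
  | some m => PySem.Chars.startswith (PySem.Chars.lstrip l) m.toList

-- the length / forbidden-chars checks, identical text in A and B
def pvJudge (codeL : List Char) : Bool × String :=
  let codeLength := codeL.length
  if 300 < codeLength then
    (false, String.ofList ("The code is too long (".toList ++ PySem.Int.toChars (codeLength : Int) ++ "). It must be shorter than 300 symbols.".toList))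
  else
    let forb := "eiou*/.".toList.filter (fun c => PySem.Chars.isIn [c] codeL)
    if forb.isEmpty = false then
      (false, String.ofList ("Your code maybe returns correct answers, but it contains forbidden characters: \"".toList ++ forb ++ "\".".toList))
    else
      (true, String.ofList ("Code length: ".toList ++ PySem.Int.toChars (codeLength : Int)))

-- while lines and (empty(lines[0]) or start_with_comment(lines[0])): lines.pop(0)
def pvPopFront (p : List Char → Bool) : List (List Char) → List (List Char)
  | [] => []
  | l :: ls => if p l then pvPopFront p ls else l :: ls

-- while lines and (empty(lines[-1]) or start_with_comment(lines[-1])): lines.pop(-1)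
def pvPopBack (p : List Char → Bool) (ls : List (List Char)) : List (List Char) :=
  if h : ls = [] then ls
  else if p (ls.getLast h) then pvPopBack p ls.dropLast else ls
termination_by ls.length
decreasing_by
  have : ls.length ≠ 0 := fun hl => h (List.eq_nil_of_length_eq_zero hl)
  simp [List.length_dropLast]; omega

def inspector (code : String) (runner : Option String) : Bool × String :=
  let mark := pvGetMark runner
  let lines := PySem.Chars.splitlines code.toList
  let lines1 := pvPopFront (fun l => pvEmpty l || pvStartsComment mark l) lines
  let lines2 := pvPopBack (fun l => pvEmpty l || pvStartsComment mark l) lines1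
  pvJudge (PySem.Chars.join ['\n'] lines2)

-- ===== PORT B =====
-- while start < end and trivial(lines[start]): start += 1
def pvScanF (p : List Char → Bool) (ls : List (List Char)) (s e : Nat) : Nat :=
  if _h : s < e then
    if p (ls.getD s []) then pvScanF p ls (s + 1) e else s
  else s
termination_by e - s
decreasing_by omega

-- while end > start and trivial(lines[end - 1]): end -= 1
def pvScanB (p : List Char → Bool) (ls : List (List Char)) (s e : Nat) : Nat :=
  if _h : s < e then
    if p (ls.getD (e - 1) []) then pvScanB p ls s (e - 1) else e
  else e
termination_by e - s
decreasing_by omega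

def inspector_alt (code : String) (runner : Option String) : Bool × String :=
  let mark := pvGetMark runner
  let lines := PySem.Chars.splitlines code.toList
  let start := pvScanF (fun l => pvEmpty l || pvStartsComment mark l) lines 0 lines.length
  let stop := pvScanB (fun l => pvEmpty l || pvStartsComment mark l) lines start lines.length
  pvJudge (PySem.Chars.join ['\n'] (PySem.List.slice lines (some (start : Int)) (some (stop : Int))))

-- ===== PRECONDITION & SPEC =====
def Spec_inspector (code : String) (runner : Option String) (out : Bool × String) : Prop := out = inspector_alt code runner
instance (code : String) (runner : Option String) (out : Bool × String) : Decidable (Spec_inspector code runner out) := by unfold Spec_inspector; infer_instance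

-- ===== CLAIM (what is proved, stated in full; the proofs are below) =====
def Claim_equal_inspector : Prop := ∀ (code : String) (runner : Option String), Dom_inspector code runner → Spec_inspector code runner (inspector code runner)

-- ===== LEMMAS AND PROOFS =====

theorem pv_length_takeWhile_le {α : Type} (p : α → Bool) (l : List α) :
    (l.takeWhile p).length ≤ l.length := (List.takeWhile_sublist p).length_le

theorem pv_dropWhile_eq_drop {α : Type} (p : α → Bool) (l : List α) :
    l.dropWhile p = l.drop (l.takeWhile p).length := by
  induction l with
  | nil => rfl
  | cons a t ih =>
    by_cases h : p a <;> simp [h, ih]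

theorem pv_popFront_eq (p : List Char → Bool) (ls : List (List Char)) :
    pvPopFront p ls = ls.dropWhile p := by
  induction ls with
  | nil => rfl
  | cons a t ih =>
    by_cases h : p a <;> simp [pvPopFront, h, ih]

theorem pv_popBack_eq (p : List Char → Bool) (ls : List (List Char)) :
    pvPopBack p ls = (ls.reverse.dropWhile p).reverse := by
  induction ls using List.reverseRecOn with
  | nil => simp [pvPopBack]
  | append_singleton xs a ih =>
    rw [pvPopBack]
    have hne : xs ++ [a] ≠ [] := by simp
    rw [dif_neg hne]
    by_cases hp : p a
    · simp [hp, ih]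
    · simp [hp]

theorem pv_scanF_eq (p : List Char → Bool) (ls : List (List Char)) :
    ∀ k s e, e - s = k → s ≤ e → e ≤ ls.length →
      pvScanF p ls s e = s + (((ls.drop s).take (e - s)).takeWhile p).length := by
  intro k
  induction k with
  | zero =>
    intro s e h1 _ _
    rw [pvScanF, dif_neg (by omega : ¬ s < e)]
    have : e - s = 0 := h1
    simp [this]
  | succ n ih =>
    intro s e h1 h2 h3
    have hse : s < e := by omega
    have hsl : s < ls.length := by omega
    rw [pvScanF, dif_pos hse, List.getD_eq_getElem ls [] hsl]
    have hdrop : ls.drop s = ls[s] :: ls.drop (s + 1) := List.drop_eq_getElem_cons hsl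
    have hes : e - s = (e - (s + 1)) + 1 := by omega
    by_cases hp : p ls[s]
    · rw [if_pos hp, ih (s + 1) e (by omega) (by omega) h3, hdrop, hes,
        List.take_succ_cons, List.takeWhile_cons_of_pos hp]
      simp; omega
    · rw [if_neg hp, hdrop, hes, List.take_succ_cons, List.takeWhile_cons_of_neg hp]
      simp

theorem pv_scanB_eq (p : List Char → Bool) (ls : List (List Char)) :
    ∀ k s e, e - s = k → s ≤ e → e ≤ ls.length →
      pvScanB p ls s e = e - ((((ls.drop s).take (e - s)).reverse).takeWhile p).length := by
  intro k
  induction k with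
  | zero =>
    intro s e h1 _ _
    rw [pvScanB, dif_neg (by omega : ¬ s < e)]
    have : e - s = 0 := h1
    simp [this]
  | succ n ih =>
    intro s e h1 h2 h3
    have hse : s < e := by omega
    have hel : e - 1 < ls.length := by omega
    rw [pvScanB, dif_pos hse, List.getD_eq_getElem ls [] hel]
    have hr : (ls.drop s).take (e - s) = (ls.drop s).take (e - 1 - s) ++ [ls[e - 1]] := by
      have h4 : e - s = (e - 1 - s) + 1 := by omega
      rw [h4, List.take_add_one]
      have h5 : (ls.drop s)[e - 1 - s]? = some ls[e - 1] := by
        rw [List.getElem?_drop]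
        have h6 : s + (e - 1 - s) = e - 1 := by omega
        rw [h6, List.getElem?_eq_getElem hel]
      rw [h5]; rfl
    by_cases hp : p ls[e - 1]
    · rw [if_pos hp, ih s (e - 1) (by omega) (by omega) (by omega), hr,
        List.reverse_append]
      simp only [List.reverse_cons, List.reverse_nil, List.nil_append, List.cons_append,
        List.takeWhile_cons_of_pos hp]
      have hL : (((ls.drop s).take (e - 1 - s)).reverse.takeWhile p).length ≤ e - 1 - s := by
        have h7 := pv_length_takeWhile_le p ((ls.drop s).take (e - 1 - s)).reverse
        have h8 : (((ls.drop s).take (e - 1 - s)).reverse).length ≤ e - 1 - s := by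
          simp [List.length_reverse, List.length_take]
        omega
      simp only [List.length_cons]
      omega
    · rw [if_neg hp, hr, List.reverse_append]
      simp [List.takeWhile_cons_of_neg hp]

theorem pv_trim_eq (p : List Char → Bool) (ls : List (List Char)) :
    pvPopBack p (pvPopFront p ls) =
      PySem.List.slice ls (some ((pvScanF p ls 0 ls.length : Nat) : Int))
        (some ((pvScanB p ls (pvScanF p ls 0 ls.length) ls.length : Nat) : Int)) := by
  have hs : pvScanF p ls 0 ls.length = (ls.takeWhile p).length := by
    rw [pv_scanF_eq p ls ls.length 0 ls.length (by omega) (by omega) le_rfl]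
    simp
  rw [hs]
  have hsle : (ls.takeWhile p).length ≤ ls.length := pv_length_takeWhile_le p ls
  have hdrop : ls.drop (ls.takeWhile p).length = ls.dropWhile p :=
    (pv_dropWhile_eq_drop p ls).symm
  have hdl : (ls.dropWhile p).length = ls.length - (ls.takeWhile p).length := by
    rw [← hdrop, List.length_drop]
  have he : pvScanB p ls (ls.takeWhile p).length ls.length =
      ls.length - ((ls.dropWhile p).reverse.takeWhile p).length := by
    rw [pv_scanB_eq p ls (ls.length - (ls.takeWhile p).length) (ls.takeWhile p).length
      ls.length rfl hsle le_rfl, hdrop]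
    rw [List.take_of_length_le (by omega)]
  rw [he, PySem.List.slice_natCast, hdrop]
  have hk : ((ls.dropWhile p).reverse.takeWhile p).length ≤ (ls.dropWhile p).length := by
    have h7 := pv_length_takeWhile_le p (ls.dropWhile p).reverse
    simpa using h7
  rw [pv_popFront_eq, pv_popBack_eq,
    pv_dropWhile_eq_drop p (ls.dropWhile p).reverse, List.reverse_drop]
  simp only [List.reverse_reverse, List.length_reverse]
  congr 1
  omega

-- ===== VERDICT (by name: the statement is the Claim_ definition above) =====
theorem inspector_spec : Claim_equal_inspector := by
  intro code runner _
  show inspector code runner = inspector_alt code runner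
  simp only [inspector, inspector_alt]
  rw [pv_trim_eq]
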